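-- pv_equiv track=rewrite | github.com/xvzezi/multikws | Tool/sparse_tensor.py | decode_sparse_tensor
-- ===== SOURCE A (Python) =====
-- def decode_a_seq(indexes, spars_tensor, trans_dict=None):
--     decoded = []
--     for m in indexes:
--         label = spars_tensor[1][m]
--         if trans_dict is not None:
--             label = trans_dict[label]
--         decoded.append(label)
--     return decoded
--
-- def decode_sparse_tensor(sparse_tensor, trans_dict=None):
--     decoded_indexes = list()
--     current_i = 0
--     current_seq = []
--     for offset, i_and_index in enumerate(sparse_tensor[0]):
--         i = i_and_index[0]
--         if i != current_i:
--             decoded_indexes.append(current_seq)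
--             current_i = i
--             current_seq = list()
--         current_seq.append(offset)
--     decoded_indexes.append(current_seq)
--     result = []
--     for index in decoded_indexes:
--         result.append(decode_a_seq(index, sparse_tensor, trans_dict))
--     return result
-- ===== SOURCE B (Python) =====
-- def decode_sparse_tensor(sparse_tensor, trans_dict=None):
--     # One fused pass: group and decode together, no offset table, no helper.
--     result = []
--     current_i = 0
--     current_seq = []
--     for offset, entry in enumerate(sparse_tensor[0]):
--         if entry[0] != current_i:
--             result.append(current_seq)
--             current_i = entry[0]
--             current_seq = []
--         label = sparse_tensor[1][offset]
--         if trans_dict is not None: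
--             label = trans_dict[label]
--         current_seq.append(label)
--     result.append(current_seq)
--     return result
-- ===== Notes on version B (the rewrite author's own statement) =====
-- stated objective: simpler
-- what changed: Fused A's two phases into a single pass that decodes each label inline while grouping, removing the intermediate offset-group table and the decode_a_seq helper.
import Mathlib
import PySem

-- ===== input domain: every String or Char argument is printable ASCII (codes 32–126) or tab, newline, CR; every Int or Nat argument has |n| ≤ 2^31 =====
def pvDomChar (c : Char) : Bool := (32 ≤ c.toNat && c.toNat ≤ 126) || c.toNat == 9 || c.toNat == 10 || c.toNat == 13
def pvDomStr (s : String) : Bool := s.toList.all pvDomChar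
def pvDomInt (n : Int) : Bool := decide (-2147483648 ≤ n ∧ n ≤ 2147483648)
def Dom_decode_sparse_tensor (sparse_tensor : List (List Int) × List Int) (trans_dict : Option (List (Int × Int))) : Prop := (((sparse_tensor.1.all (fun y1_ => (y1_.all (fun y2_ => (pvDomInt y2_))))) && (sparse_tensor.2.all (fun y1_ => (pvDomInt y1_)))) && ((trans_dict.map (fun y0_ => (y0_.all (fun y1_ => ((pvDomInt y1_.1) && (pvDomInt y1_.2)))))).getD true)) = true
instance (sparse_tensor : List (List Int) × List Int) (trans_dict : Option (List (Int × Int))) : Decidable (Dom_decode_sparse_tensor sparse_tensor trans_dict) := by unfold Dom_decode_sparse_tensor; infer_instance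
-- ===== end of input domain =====

-- B fuses A's two phases (offset-grouping table + decode_a_seq) into one pass that
-- decodes labels inline while grouping: simpler, same O(n) cost.
-- Under Pre_ every indexing and dict lookup succeeds, so the ports' .getD defaults are never used.

-- ===== PORT A =====
-- decode_a_seq: label = spars_tensor[1][m]; if trans_dict is not None: label = trans_dict[label]
def decode_a_seq (indexes : List Int) (spars_tensor : List (List Int) × List Int) (trans_dict : Option (List (Int × Int))) : List Int :=
  indexes.foldl (fun decoded m =>
    let label := (PySem.List.pyGet? spars_tensor.2 m).getD 0
    let label := match trans_dict with
      | none => label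
      | some d => ((PySem.Dict.ofList d).get? label).getD 0
    decoded ++ [label]) []

def decode_sparse_tensor (sparse_tensor : List (List Int) × List Int) (trans_dict : Option (List (Int × Int))) : List (List Int) :=
  -- phase 1: group offsets by the running first coordinate
  let st := (PySem.List.enumerate sparse_tensor.1).foldl
    (fun (s : List (List Int) × Int × List Int) p =>
      let i := (PySem.List.pyGet? p.2 0).getD 0
      if i ≠ s.2.1 then (s.1 ++ [s.2.2], i, [p.1])
      else (s.1, s.2.1, s.2.2 ++ [p.1]))
    ([], 0, [])
  let decoded_indexes := st.1 ++ [st.2.2]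
  -- phase 2: decode each offset group
  decoded_indexes.foldl (fun result index => result ++ [decode_a_seq index sparse_tensor trans_dict]) []

-- ===== PORT B =====
def decode_sparse_tensor_alt (sparse_tensor : List (List Int) × List Int) (trans_dict : Option (List (Int × Int))) : List (List Int) :=
  let st := (PySem.List.enumerate sparse_tensor.1).foldl
    (fun (s : List (List Int) × Int × List Int) p =>
      let i := (PySem.List.pyGet? p.2 0).getD 0
      let s := if i ≠ s.2.1 then (s.1 ++ [s.2.2], i, ([] : List Int)) else s
      let label := (PySem.List.pyGet? sparse_tensor.2 p.1).getD 0
      let label := match trans_dict with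
        | none => label
        | some d => ((PySem.Dict.ofList d).get? label).getD 0
      (s.1, s.2.1, s.2.2 ++ [label]))
    ([], 0, [])
  st.1 ++ [st.2.2]

-- ===== PRECONDITION & SPEC =====
-- Pre_ excludes exactly the inputs on which A raises: an empty row in sparse_tensor[0]
-- (IndexError on row[0]), fewer values than index rows (IndexError on sparse_tensor[1][offset]),
-- or, when trans_dict is given, an accessed value missing from it (KeyError).
def Pre_decode_sparse_tensor (sparse_tensor : List (List Int) × List Int) (trans_dict : Option (List (Int × Int))) : Prop :=
  (∀ row ∈ sparse_tensor.1, row ≠ []) ∧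
  sparse_tensor.1.length ≤ sparse_tensor.2.length ∧
  ((match trans_dict with
    | none => true
    | some d => (sparse_tensor.2.take sparse_tensor.1.length).all
        (fun label => ((PySem.Dict.ofList d).get? label).isSome)) = true)
instance (sparse_tensor : List (List Int) × List Int) (trans_dict : Option (List (Int × Int))) : Decidable (Pre_decode_sparse_tensor sparse_tensor trans_dict) := by unfold Pre_decode_sparse_tensor; infer_instance
def pvWitness_decode_sparse_tensor : (List (List Int) × List Int) × (Option (List (Int × Int))) :=
  (([[0, 1], [0, 2], [1, 0]], [5, 6, 7]), some [(5, 50), (6, 60), (7, 70)])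

def Spec_decode_sparse_tensor (sparse_tensor : List (List Int) × List Int) (trans_dict : Option (List (Int × Int))) (out : List (List Int)) : Prop := out = decode_sparse_tensor_alt sparse_tensor trans_dict
instance (sparse_tensor : List (List Int) × List Int) (trans_dict : Option (List (Int × Int))) (out : List (List Int)) : Decidable (Spec_decode_sparse_tensor sparse_tensor trans_dict out) := by unfold Spec_decode_sparse_tensor; infer_instance

-- ===== CLAIM (what is proved, stated in full; the proofs are below) =====
def Claim_equal_decode_sparse_tensor : Prop := ∀ (sparse_tensor : List (List Int) × List Int) (trans_dict : Option (List (Int × Int))), Dom_decode_sparse_tensor sparse_tensor trans_dict → Pre_decode_sparse_tensor sparse_tensor trans_dict → Spec_decode_sparse_tensor sparse_tensor trans_dict (decode_sparse_tensor sparse_tensor trans_dict)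

-- ===== LEMMAS AND PROOFS =====

-- the common label transform both ports apply to an offset
def pvLabel (sparse_tensor : List (List Int) × List Int) (trans_dict : Option (List (Int × Int))) (m : Int) : Int :=
  let label := (PySem.List.pyGet? sparse_tensor.2 m).getD 0
  match trans_dict with
  | none => label
  | some d => ((PySem.Dict.ofList d).get? label).getD 0

theorem pv_seq_step_eq (st : List (List Int) × List Int) (td : Option (List (Int × Int))) :
    (fun (decoded : List Int) (m : Int) =>
      let label := (PySem.List.pyGet? st.2 m).getD 0
      let label := match td with
        | none => label
        | some d => ((PySem.Dict.ofList d).get? label).getD 0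
      decoded ++ [label]) = fun decoded m => decoded ++ [pvLabel st td m] := by
  funext decoded m; cases td <;> simp [pvLabel]

theorem pv_foldl_append_map (f : Int → Int) (l : List Int) :
    ∀ acc : List Int, l.foldl (fun d m => d ++ [f m]) acc = acc ++ l.map f := by
  induction l with
  | nil => simp
  | cons x xs ih => intro acc; simp [ih (acc ++ [f x])]

theorem decode_a_seq_eq_map (indexes : List Int) (st : List (List Int) × List Int) (td : Option (List (Int × Int))) :
    decode_a_seq indexes st td = indexes.map (pvLabel st td) := by
  unfold decode_a_seq
  rw [pv_seq_step_eq]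
  simpa using pv_foldl_append_map (pvLabel st td) indexes []

-- A's grouping step in clean form
def pvStepA (s : List (List Int) × Int × List Int) (p : Int × List Int) : List (List Int) × Int × List Int :=
  let i := (PySem.List.pyGet? p.2 0).getD 0
  if i ≠ s.2.1 then (s.1 ++ [s.2.2], i, [p.1])
  else (s.1, s.2.1, s.2.2 ++ [p.1])

-- B's fused step in clean form
def pvStepB (st : List (List Int) × List Int) (td : Option (List (Int × Int)))
    (s : List (List Int) × Int × List Int) (p : Int × List Int) : List (List Int) × Int × List Int :=
  let i := (PySem.List.pyGet? p.2 0).getD 0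
  if i ≠ s.2.1 then (s.1 ++ [s.2.2], i, [pvLabel st td p.1])
  else (s.1, s.2.1, s.2.2 ++ [pvLabel st td p.1])

theorem pv_stepB_eq (st : List (List Int) × List Int) (td : Option (List (Int × Int))) :
    (fun (s : List (List Int) × Int × List Int) (p : Int × List Int) =>
      let i := (PySem.List.pyGet? p.2 0).getD 0
      let s := if i ≠ s.2.1 then (s.1 ++ [s.2.2], i, ([] : List Int)) else s
      let label := (PySem.List.pyGet? st.2 p.1).getD 0
      let label := match td with
        | none => label
        | some d => ((PySem.Dict.ofList d).get? label).getD 0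
      (s.1, s.2.1, s.2.2 ++ [label])) = pvStepB st td := by
  funext s p
  by_cases h : (PySem.List.pyGet? p.2 0).getD 0 = s.2.1 <;>
    cases td <;> simp [pvStepB, pvLabel, h]

theorem pv_stepA_eq :
    (fun (s : List (List Int) × Int × List Int) (p : Int × List Int) =>
      let i := (PySem.List.pyGet? p.2 0).getD 0
      if i ≠ s.2.1 then (s.1 ++ [s.2.2], i, [p.1])
      else (s.1, s.2.1, s.2.2 ++ [p.1])) = pvStepA := by
  funext s p; simp [pvStepA]

theorem pv_fused_fold (st : List (List Int) × List Int) (td : Option (List (Int × Int)))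
    (l : List (Int × List Int)) :
    ∀ (di : List (List Int)) (ci : Int) (cs : List Int),
      l.foldl (pvStepB st td) (di.map (List.map (pvLabel st td)), ci, cs.map (pvLabel st td)) =
      (fun (s : List (List Int) × Int × List Int) =>
          (s.1.map (List.map (pvLabel st td)), s.2.1, s.2.2.map (pvLabel st td)))
        (l.foldl pvStepA (di, ci, cs)) := by
  induction l with
  | nil => intro di ci cs; simp
  | cons p l ih =>
    intro di ci cs
    by_cases h : (PySem.List.pyGet? p.2 0).getD 0 = ci
    · have := ih di ci (cs ++ [p.1])
      simp only [List.map_append, List.map_cons, List.map_nil] at this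
      simpa [pvStepA, pvStepB, h] using this
    · have := ih (di ++ [cs]) ((PySem.List.pyGet? p.2 0).getD 0) [p.1]
      simp only [List.map_append, List.map_cons, List.map_nil] at this
      simpa [pvStepA, pvStepB, h] using this

theorem pv_phase2 (st : List (List Int) × List Int) (td : Option (List (Int × Int)))
    (groups : List (List Int)) : ∀ acc,
    groups.foldl (fun result index => result ++ [decode_a_seq index st td]) acc =
      acc ++ groups.map (List.map (pvLabel st td)) := by
  induction groups with
  | nil => simp
  | cons g gs ih =>
    intro acc
    rw [List.foldl_cons, ih, decode_a_seq_eq_map]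
    simp

-- ===== VERDICT (by name: the statement is the Claim_ definition above) =====
theorem decode_sparse_tensor_spec : Claim_equal_decode_sparse_tensor := by
  intro st td _ _
  unfold Spec_decode_sparse_tensor decode_sparse_tensor decode_sparse_tensor_alt
  rw [pv_stepA_eq, pv_stepB_eq, pv_phase2]
  have h := pv_fused_fold st td (PySem.List.enumerate st.1) [] 0 []
  simp only [List.map_nil] at h
  rw [h]
  simp
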